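-- pv_equiv track=rewrite | github.com/raeez/chiral-bar-cobar | compute/lib/theorem_higher_dim_modular_operad_engine.py | _edge_aut_factor
-- ===== SOURCE A (Python) =====
-- from math import factorial, comb
-- from typing import Any, Dict, List, Optional, Tuple
-- from collections import Counter
--
-- def _edge_aut_factor(edges: Tuple[Tuple[int, int], ...],
--                      vertex_perm: Tuple[int, ...]) -> int:
--     """Count edge-level automorphisms for a given vertex permutation."""
--     mapped = []
--     for v1, v2 in edges:
--         a, b = vertex_perm[v1], vertex_perm[v2]
--         mapped.append((min(a, b), max(a, b)))
--
--     orig_groups = Counter(edges)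
--     map_groups = Counter(mapped)
--     if orig_groups != map_groups:
--         return 0
--
--     factor = 1
--     for (a, b), k in orig_groups.items():
--         factor *= factorial(k)
--         if a == b:
--             factor *= 2 ** k
--     return factor
-- ===== SOURCE B (Python) =====
-- from math import factorial
--
--
-- def _edge_aut_factor(edges, vertex_perm):
--     """Sort-and-scan reimplementation: compare sorted edge lists instead of
--     Counters, and read off each multiplicity from a contiguous run."""
--     mapped = sorted(
--         (min(vertex_perm[v1], vertex_perm[v2]), max(vertex_perm[v1], vertex_perm[v2]))
--         for v1, v2 in edges
--     )
--     sorted_orig = sorted(edges)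
--     if sorted_orig != mapped:
--         return 0
--
--     factor = 1
--     i = 0
--     n = len(sorted_orig)
--     while i < n:
--         j = i + 1
--         while j < n and sorted_orig[j] == sorted_orig[i]:
--             j += 1
--         k = j - i
--         factor *= factorial(k)
--         a, b = sorted_orig[i]
--         if a == b:
--             factor *= 2 ** k
--         i = j
--     return factor
-- ===== Notes on version B (the rewrite author's own statement) =====
-- stated objective: alternative
-- what changed: Replaces the two Counter hash tables and dict iteration by sorting both edge lists, comparing them directly, and reading each multiplicity off a contiguous run of the sorted list in one scan.
import Mathlib
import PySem

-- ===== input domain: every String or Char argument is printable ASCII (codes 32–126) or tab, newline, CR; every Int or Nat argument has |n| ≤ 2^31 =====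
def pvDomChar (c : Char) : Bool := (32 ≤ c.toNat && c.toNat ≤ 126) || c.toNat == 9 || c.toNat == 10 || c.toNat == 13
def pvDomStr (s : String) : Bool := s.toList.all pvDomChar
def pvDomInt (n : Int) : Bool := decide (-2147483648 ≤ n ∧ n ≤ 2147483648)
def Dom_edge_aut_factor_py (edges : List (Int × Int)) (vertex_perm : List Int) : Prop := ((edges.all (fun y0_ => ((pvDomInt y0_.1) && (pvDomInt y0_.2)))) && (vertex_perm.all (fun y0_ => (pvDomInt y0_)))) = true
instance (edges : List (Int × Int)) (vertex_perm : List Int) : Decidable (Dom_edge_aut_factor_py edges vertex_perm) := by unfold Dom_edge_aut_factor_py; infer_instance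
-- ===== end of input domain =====

-- B replaces the two Counter hash tables by sorting both edge lists, comparing them, and reading
-- multiplicities off contiguous runs of the sorted list (objective: alternative, same results).

-- ===== PORT A =====

-- math.factorial k (the loop only ever applies it to the positive counts of a Counter)
def pvFact (k : Int) : Int := (Nat.factorial k.toNat : Int)

-- Python dict/Counter '==': same size and every (key, value) of the first found in the second
def pvDictEq (d1 d2 : PySem.Dict (Int × Int) Int) : Bool :=
  d1.size == d2.size && d1.items.all (fun kv => d2.get? kv.1 == some kv.2)

def edge_aut_factor_py (edges : List (Int × Int)) (vertex_perm : List Int) : Int :=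
  let mapped := edges.foldl (fun acc e =>
      let a := PySem.List.pyGetD vertex_perm e.1 0
      let b := PySem.List.pyGetD vertex_perm e.2 0
      acc ++ [(min a b, max a b)]) []
  let origGroups := PySem.Dict.counter edges
  let mapGroups := PySem.Dict.counter mapped
  if !(pvDictEq origGroups mapGroups) then 0
  else origGroups.items.foldl (fun factor kv =>
      let factor := factor * pvFact kv.2
      if kv.1.1 == kv.1.2 then factor * 2 ^ kv.2.toNat else factor) 1

-- ===== PORT B =====

-- the run scan of Source B: take the run of the first element, multiply its group factor, recurse on the rest
def pvRunsFactor : List (Int × Int) → Int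
  | [] => 1
  | e :: rest =>
    let k := (rest.takeWhile (fun x => x == e)).length + 1
    let f := (Nat.factorial k : Int)
    let f := if e.1 == e.2 then f * 2 ^ k else f
    f * pvRunsFactor (rest.dropWhile (fun x => x == e))
termination_by s => s.length
decreasing_by
  simpa using Nat.lt_succ_of_le (List.length_dropWhile_le _ _)

def edge_aut_factor_py_alt (edges : List (Int × Int)) (vertex_perm : List Int) : Int :=
  let mapped := PySem.List.sorted2 (edges.map (fun e =>
      let a := PySem.List.pyGetD vertex_perm e.1 0
      let b := PySem.List.pyGetD vertex_perm e.2 0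
      (min a b, max a b))) Prod.fst Prod.snd
  let sortedOrig := PySem.List.sorted2 edges Prod.fst Prod.snd
  if sortedOrig ≠ mapped then 0 else pvRunsFactor sortedOrig

-- ===== PRECONDITION & SPEC =====
-- A indexes vertex_perm[v] for every edge endpoint v: out of range (Python negative indexing
-- included) raises IndexError, so exactly those inputs are excluded.
def Pre_edge_aut_factor_py (edges : List (Int × Int)) (vertex_perm : List Int) : Prop :=
  ∀ e ∈ edges, PySem.Raise.InRange vertex_perm.length e.1 ∧ PySem.Raise.InRange vertex_perm.length e.2
instance (edges : List (Int × Int)) (vertex_perm : List Int) : Decidable (Pre_edge_aut_factor_py edges vertex_perm) := by unfold Pre_edge_aut_factor_py; infer_instance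

def pvWitness_edge_aut_factor_py : (List (Int × Int)) × List Int := ([(0, 1), (1, 0)], [3, 5])

def Spec_edge_aut_factor_py (edges : List (Int × Int)) (vertex_perm : List Int) (out : Int) : Prop := out = edge_aut_factor_py_alt edges vertex_perm
instance (edges : List (Int × Int)) (vertex_perm : List Int) (out : Int) : Decidable (Spec_edge_aut_factor_py edges vertex_perm out) := by unfold Spec_edge_aut_factor_py; infer_instance

-- ===== CLAIM (what is proved, stated in full; the proofs are below) =====
def Claim_equal_edge_aut_factor_py : Prop := ∀ (edges : List (Int × Int)) (vertex_perm : List Int), Dom_edge_aut_factor_py edges vertex_perm → Pre_edge_aut_factor_py edges vertex_perm → Spec_edge_aut_factor_py edges vertex_perm (edge_aut_factor_py edges vertex_perm)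

-- ===== LEMMAS AND PROOFS =====

-- the per-group factor k! * (2^k when the endpoints coincide)
def pvG (x : Int × Int) (k : Nat) : Int :=
  (Nat.factorial k : Int) * (if x.1 == x.2 then (2 : Int) ^ k else 1)

-- the common value of both programs on the equal branch: the product of group factors
def pvF (s : List (Int × Int)) : Int := ∏ x ∈ s.toFinset, pvG x (s.count x)

lemma pv_pair_eq_of_le_le {a b : Int × Int} (h1 : toLex a ≤ toLex b) (h2 : toLex b ≤ toLex a) :
    a = b :=
  toLex.injective (le_antisymm h1 h2)

lemma pv_sorted2_eq_sorted_toLex (xs : List (Int × Int)) :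
    PySem.List.sorted2 xs Prod.fst Prod.snd = PySem.List.sorted xs (fun x => toLex x) := by
  have hb : ∀ (a b : Int × Int),
      (decide (a.1 < b.1) || (!decide (b.1 < a.1) && decide (a.2 < b.2)))
        = decide (toLex a < toLex b) := by
    intro a b
    rw [Bool.eq_iff_iff]
    simp only [Prod.Lex.lt_iff, ofLex_toLex, Bool.or_eq_true, Bool.and_eq_true,
      Bool.not_eq_true', decide_eq_true_eq, decide_eq_false_iff_not]
    omega
  unfold PySem.List.sorted2 PySem.List.sorted
  simp only [Bool.false_eq_true, if_false, hb]

lemma pv_sorted2_eq_iff (xs ys : List (Int × Int)) :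
    PySem.List.sorted2 xs Prod.fst Prod.snd = PySem.List.sorted2 ys Prod.fst Prod.snd ↔ xs.Perm ys := by
  constructor
  · intro h
    have hy := PySem.List.sorted2_perm ys Prod.fst Prod.snd false
    rw [← h] at hy
    exact (PySem.List.sorted2_perm xs Prod.fst Prod.snd false).symm.trans hy
  · intro h
    rw [pv_sorted2_eq_sorted_toLex, pv_sorted2_eq_sorted_toLex]
    exact PySem.List.sorted_eq_sorted_of_perm _ _ _ toLex.injective h

lemma pv_dictEq_counter_iff (xs ys : List (Int × Int)) :
    pvDictEq (PySem.Dict.counter xs) (PySem.Dict.counter ys) = true ↔ xs.Perm ys := by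
  constructor
  · intro h
    unfold pvDictEq at h
    rw [Bool.and_eq_true, beq_iff_eq, List.all_eq_true] at h
    obtain ⟨hsize, hall⟩ := h
    have hsub : (PySem.Dict.counter xs).keys ⊆ (PySem.Dict.counter ys).keys := by
      intro k hk
      obtain ⟨kv, hkv, hfst⟩ := List.mem_map.mp hk
      have hg := hall kv hkv
      rw [beq_iff_eq] at hg
      by_contra hn
      rw [← PySem.Dict.get?_eq_none_iff_not_mem_keys] at hn
      rw [hfst] at hg
      rw [hg] at hn
      exact Option.some_ne_none _ hn
    have hlen : (PySem.Dict.counter ys).keys.length ≤ (PySem.Dict.counter xs).keys.length := by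
      unfold PySem.Dict.size at hsize
      simp only [PySem.Dict.keys, List.length_map]
      omega
    have hkperm : (PySem.Dict.counter xs).keys.Perm (PySem.Dict.counter ys).keys :=
      ((PySem.Dict.nodup_keys_counter xs).subperm hsub).perm_of_length_le hlen
    have hkeys : ∀ a : Int × Int, a ∈ xs ↔ a ∈ ys := by
      intro a
      have := hkperm.mem_iff (a := a)
      rwa [PySem.Dict.keys_counter, PySem.Dict.keys_counter, PySem.Set.mem_ofList,
        PySem.Set.mem_ofList] at this
    rw [List.perm_iff_count]
    intro a
    by_cases ha : a ∈ xs
    · have hmem : (a, (List.count a xs : Int)) ∈ (PySem.Dict.counter xs).items := by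
        rw [PySem.Dict.items_counter]
        exact List.mem_map_of_mem ((PySem.Set.mem_ofList xs a).mpr ha)
      have h2 := hall _ hmem
      rw [beq_iff_eq] at h2
      have hay : a ∈ ys := (hkeys a).mp ha
      have hmem2 : (a, (List.count a ys : Int)) ∈ (PySem.Dict.counter ys).items := by
        rw [PySem.Dict.items_counter]
        exact List.mem_map_of_mem ((PySem.Set.mem_ofList ys a).mpr hay)
      have h3 := (PySem.Dict.get?_eq_some_iff_mem_items _ _ _
        (PySem.Dict.nodup_keys_counter ys)).mpr hmem2
      have h4 := Option.some.inj (h2.symm.trans h3)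
      simp only at h4
      exact_mod_cast h4
    · have hay : a ∉ ys := fun hy => ha ((hkeys a).mpr hy)
      rw [List.count_eq_zero.mpr ha, List.count_eq_zero.mpr hay]
  · intro h
    have hperm : (PySem.Set.ofList xs).Perm (PySem.Set.ofList ys) := by
      rw [List.perm_ext_iff_of_nodup (PySem.Set.nodup_ofList xs) (PySem.Set.nodup_ofList ys)]
      intro a
      rw [PySem.Set.mem_ofList, PySem.Set.mem_ofList]
      exact h.mem_iff
    unfold pvDictEq
    rw [Bool.and_eq_true, beq_iff_eq, List.all_eq_true]
    constructor
    · simp only [PySem.Dict.size, PySem.Dict.items_counter, List.length_map]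
      exact hperm.length_eq
    · intro kv hkv
      rw [PySem.Dict.items_counter] at hkv
      obtain ⟨k, hk, rfl⟩ := List.mem_map.mp hkv
      have hky : k ∈ ys := h.mem_iff.mp ((PySem.Set.mem_ofList xs k).mp hk)
      have hmem2 : (k, (List.count k ys : Int)) ∈ (PySem.Dict.counter ys).items := by
        rw [PySem.Dict.items_counter]
        exact List.mem_map_of_mem ((PySem.Set.mem_ofList ys k).mpr hky)
      have hg := (PySem.Dict.get?_eq_some_iff_mem_items _ _ _
        (PySem.Dict.nodup_keys_counter ys)).mpr hmem2
      rw [hg, h.count_eq]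
      simp

lemma pv_foldl_factor (l : List ((Int × Int) × Int)) (init : Int) :
    l.foldl (fun factor kv =>
        let factor := factor * pvFact kv.2
        if kv.1.1 == kv.1.2 then factor * 2 ^ kv.2.toNat else factor) init
      = init * (l.map (fun kv => pvG kv.1 kv.2.toNat)).prod := by
  induction l generalizing init with
  | nil => simp
  | cons kv t ih =>
    rw [List.foldl_cons, List.map_cons, List.prod_cons, ih]
    have hstep : (let factor := init * pvFact kv.2;
        if (kv.1.1 == kv.1.2) = true then factor * 2 ^ kv.2.toNat else factor)
        = init * pvG kv.1 kv.2.toNat := by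
      simp only [pvG, pvFact]; split_ifs <;> ring
    rw [hstep]; ring

lemma pv_run_props (e : Int × Int) (rest : List (Int × Int))
    (h1 : ∀ x ∈ rest, toLex e ≤ toLex x)
    (h2 : rest.Pairwise (fun a b => toLex a ≤ toLex b)) :
    (rest.takeWhile (fun x => x == e)).length = rest.count e ∧
      rest.dropWhile (fun x => x == e) = rest.filter (fun x => !(x == e)) := by
  induction rest with
  | nil => simp
  | cons x t ih =>
    by_cases hx : x = e
    · subst hx
      have h1t : ∀ y ∈ t, toLex x ≤ toLex y := fun y hy => h1 y (List.mem_cons_of_mem _ hy)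
      have h2t : t.Pairwise (fun a b => toLex a ≤ toLex b) := List.Pairwise.of_cons h2
      obtain ⟨ihl, ihd⟩ := ih h1t h2t
      constructor
      · simp [ihl]
      · simp [ihd]
    · have hne : e ∉ x :: t := by
        intro hmem
        rcases List.mem_cons.mp hmem with hh | hh
        · exact hx hh.symm
        · have hxe : toLex x ≤ toLex e := (List.pairwise_cons.mp h2).1 e hh
          have hex : toLex e ≤ toLex x := h1 x List.mem_cons_self
          exact hx (pv_pair_eq_of_le_le hxe hex)
      have hxf : (x == e) = false := beq_eq_false_iff_ne.mpr hx
      have het : e ∉ t := fun ht => hne (List.mem_cons_of_mem _ ht)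
      constructor
      · simp [hxf, List.count_eq_zero.mpr hne]
      · have hft : t.filter (fun y => !(y == e)) = t := by
          rw [List.filter_eq_self]
          intro y hy
          simp only [Bool.not_eq_eq_eq_not, Bool.not_true, beq_eq_false_iff_ne, ne_eq]
          intro hye
          exact het (hye ▸ hy)
        simp [hxf, hft]

lemma pv_runsFactor_eq_pvF (s : List (Int × Int))
    (h : s.Pairwise (fun a b => toLex a ≤ toLex b)) :
    pvRunsFactor s = pvF s := by
  induction s using pvRunsFactor.induct with
  | case1 => simp [pvRunsFactor, pvF]
  | case2 e rest ih =>
    have h1 : ∀ x ∈ rest, toLex e ≤ toLex x := (List.pairwise_cons.mp h).1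
    have h2 : rest.Pairwise (fun a b => toLex a ≤ toLex b) := (List.pairwise_cons.mp h).2
    obtain ⟨hlen, hdrop⟩ := pv_run_props e rest h1 h2
    have hpd : (rest.dropWhile (fun x => x == e)).Pairwise (fun a b => toLex a ≤ toLex b) := by
      rw [hdrop]; exact h2.filter _
    have ihv := ih hpd
    have hed : e ∉ rest.dropWhile (fun x => x == e) := by
      rw [hdrop]
      intro hmem
      simpa using (List.mem_filter.mp hmem).2
    have hcnt : ∀ x ∈ rest.dropWhile (fun x => x == e),
        List.count x (rest.dropWhile (fun x => x == e)) = List.count x (e :: rest) := by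
      intro x hxd
      have hxe : x ≠ e := fun hx => hed (hx ▸ hxd)
      have hex : ¬ e = x := fun hh => hxe hh.symm
      rw [hdrop, List.count_filter (by simpa using hxe), List.count_cons]
      simp [hex]
    have hfin : (e :: rest).toFinset = insert e (rest.dropWhile (fun x => x == e)).toFinset := by
      ext y
      by_cases hy : y = e
      · simp [hy]
      · simp [hdrop, hy]
    have hk : (rest.takeWhile (fun x => x == e)).length + 1 = List.count e (e :: rest) := by
      rw [hlen, List.count_cons]
      simp
    rw [pvRunsFactor, ihv]
    have hif : (if (e.1 == e.2) = true then
          ((Nat.factorial ((rest.takeWhile (fun x => x == e)).length + 1) : Int) *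
            2 ^ ((rest.takeWhile (fun x => x == e)).length + 1))
        else ((Nat.factorial ((rest.takeWhile (fun x => x == e)).length + 1) : Int)))
        = pvG e (List.count e (e :: rest)) := by
      rw [← hk]
      unfold pvG
      split_ifs <;> ring
    rw [hif]
    unfold pvF
    rw [hfin, Finset.prod_insert (by simpa using hed)]
    congr 1
    exact Finset.prod_congr rfl fun x hx => by
      rw [hcnt x (List.mem_toFinset.mp hx)]

lemma pv_pvF_perm {s t : List (Int × Int)} (h : s.Perm t) : pvF s = pvF t := by
  unfold pvF
  have ht : s.toFinset = t.toFinset := Finset.ext fun x => by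
    simp only [List.mem_toFinset, h.mem_iff]
  rw [ht]
  exact Finset.prod_congr rfl (fun x _ => by rw [h.count_eq])

lemma pv_factor_A (edges : List (Int × Int)) :
    (PySem.Dict.counter edges).items.foldl (fun factor kv =>
        let factor := factor * pvFact kv.2
        if kv.1.1 == kv.1.2 then factor * 2 ^ kv.2.toNat else factor) 1 = pvF edges := by
  rw [pv_foldl_factor, one_mul, PySem.Dict.items_counter, List.map_map]
  have htf : (PySem.Set.ofList edges).toFinset = edges.toFinset := Finset.ext fun a => by
    simp [PySem.Set.mem_ofList]
  unfold pvF
  rw [← htf, ← List.prod_toFinset _ (PySem.Set.nodup_ofList edges)]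
  exact Finset.prod_congr rfl fun x _ => by simp [Function.comp]

-- ===== VERDICT (by name: the statement is the Claim_ definition above) =====
theorem edge_aut_factor_py_spec : Claim_equal_edge_aut_factor_py := by
  intro edges vertex_perm _dom _pre
  unfold Spec_edge_aut_factor_py edge_aut_factor_py edge_aut_factor_py_alt
  simp only [PySem.List.foldl_append_singleton_eq_map, List.nil_append]
  set f : Int × Int → Int × Int := fun e =>
      (min (PySem.List.pyGetD vertex_perm e.1 0) (PySem.List.pyGetD vertex_perm e.2 0),
       max (PySem.List.pyGetD vertex_perm e.1 0) (PySem.List.pyGetD vertex_perm e.2 0)) with hf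
  by_cases hperm : edges.Perm (edges.map f)
  · have hd : pvDictEq (PySem.Dict.counter edges) (PySem.Dict.counter (edges.map f)) = true :=
      (pv_dictEq_counter_iff _ _).mpr hperm
    have hs : PySem.List.sorted2 edges Prod.fst Prod.snd
        = PySem.List.sorted2 (edges.map f) Prod.fst Prod.snd :=
      (pv_sorted2_eq_iff _ _).mpr hperm
    rw [hd]
    simp only [Bool.not_true, Bool.false_eq_true, if_false, hs, ne_eq, not_true_eq_false]
    rw [pv_factor_A]
    have hpw : (PySem.List.sorted2 (edges.map f) Prod.fst Prod.snd).Pairwise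
        (fun a b => toLex a ≤ toLex b) := by
      rw [pv_sorted2_eq_sorted_toLex]
      exact PySem.List.sorted_pairwise _ _
    rw [pv_runsFactor_eq_pvF _ hpw]
    exact pv_pvF_perm ((PySem.List.sorted2_perm _ _ _ _).trans hperm.symm).symm
  · have hd : pvDictEq (PySem.Dict.counter edges) (PySem.Dict.counter (edges.map f)) = false := by
      rcases Bool.eq_false_or_eq_true (pvDictEq (PySem.Dict.counter edges) (PySem.Dict.counter (edges.map f))) with h | h
      · exact absurd ((pv_dictEq_counter_iff _ _).mp h) hperm
      · exact h
    have hs : PySem.List.sorted2 edges Prod.fst Prod.snd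
        ≠ PySem.List.sorted2 (edges.map f) Prod.fst Prod.snd := by
      intro h
      exact hperm ((pv_sorted2_eq_iff _ _).mp h)
    rw [hd]
    simp [hs]
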